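-- pv_equiv track=rewrite | github.com/wanbiguizhao/leetcode | 2167. Minimum Time to Remove All Cars Containing Illegal Goods.py | minimumTime2
-- ===== SOURCE A (Python) =====
-- def minimumTime2(s: str) -> int:
--     # 动态规划的方案
--     const_s_len=len(s)
--     dp_pre= [2*const_s_len]*(const_s_len+2) # for rule 1 and 3 [1,i] min remove cost
--     dp_post=[2*const_s_len]*(const_s_len+2) # for rule 2 and  [i+1,n] min remove cost
--     dp_pre[0]=0
--     dp_post[const_s_len]=0
--     ans=2*const_s_len
--     for index in range(1,const_s_len+1):
--         if s[index-1]=="1":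
--             dp_pre[index]=min(dp_pre[index-1]+2,index)
--         else:
--             dp_pre[index]=dp_pre[index-1]
--     dp_post[const_s_len]=0
--     s_th=const_s_len-1
--     while s_th>=0:
--         index=s_th
--         if s[index]=="1":
--             dp_post[s_th]=min(dp_post[s_th+1]+2,const_s_len-s_th)
--         else:
--             dp_post[s_th]=dp_post[s_th+1]
--         s_th=s_th-1
--     ans=min(map( lambda z: z[0]+z[1],zip(dp_pre,dp_post)))
--     ans=min(ans,const_s_len)
--     return ans
-- ===== SOURCE B (Python) =====
-- def minimumTime2(s: str) -> int:
--     # single forward pass: scalar prefix cost + closed-form suffix cost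
--     n = len(s)
--     ans = n
--     pre = 0
--     for i, c in enumerate(s):
--         if c == "1":
--             pre = min(pre + 2, i + 1)
--         ans = min(ans, pre + n - i - 1)
--     return ans
-- ===== Notes on version B (the rewrite author's own statement) =====
-- stated objective: simpler
-- what changed: Replaced the two DP arrays (prefix and suffix removal costs) plus zip/min combine by a single forward pass keeping one scalar prefix cost, with the suffix cost computed as the closed form n-i-1.
import Mathlib
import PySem

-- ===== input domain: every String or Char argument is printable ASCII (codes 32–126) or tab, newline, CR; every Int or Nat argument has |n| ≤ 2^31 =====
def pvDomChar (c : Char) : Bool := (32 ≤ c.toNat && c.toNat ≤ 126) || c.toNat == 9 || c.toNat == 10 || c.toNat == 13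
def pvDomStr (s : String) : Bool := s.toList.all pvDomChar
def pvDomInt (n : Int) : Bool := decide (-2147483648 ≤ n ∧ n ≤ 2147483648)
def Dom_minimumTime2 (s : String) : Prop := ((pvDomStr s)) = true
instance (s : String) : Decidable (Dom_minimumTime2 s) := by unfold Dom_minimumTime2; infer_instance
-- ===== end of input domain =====

-- B replaces A's two DP arrays + zip/min combine by one forward pass with a scalar
-- prefix cost and the closed-form suffix cost n-i-1 (simpler; O(1) extra space).

-- ===== PORT A =====
def minimumTime2 (s : String) : Int :=
  let l := s.toList
  let nn := l.length                                   -- const_s_len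
  let n : Int := nn
  let dp_pre0 : List Int := (List.replicate (nn + 2) (2 * n)).set 0 0
  let dp_post0 : List Int := (List.replicate (nn + 2) (2 * n)).set nn 0
  -- for index in range(1, const_s_len+1): …  (s[index-1] is always in range)
  let dp_pre := (List.range' 1 nn).foldl (fun dp i =>
      if l.getD (i - 1) ' ' = '1' then
        dp.set i (min (dp.getD (i - 1) 0 + 2) (i : Int))
      else
        dp.set i (dp.getD (i - 1) 0)) dp_pre0
  -- dp_post[n] = 0 again (idempotent), then: while s_th >= 0: …  (s_th = n-1 … 0)
  let dp_post := (List.range nn).reverse.foldl (fun dp i =>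
      if l.getD i ' ' = '1' then
        dp.set i (min (dp.getD (i + 1) 0 + 2) (n - i))
      else
        dp.set i (dp.getD (i + 1) 0)) dp_post0
  -- ans = min(map(lambda z: z[0]+z[1], zip(dp_pre, dp_post)))  (list has n+2 ≥ 2 elements, never empty)
  let ans := (PySem.List.min? ((dp_pre.zip dp_post).map (fun z => z.1 + z.2)) (fun x => x)).getD 0
  min ans n

-- ===== PORT B =====
def minimumTime2_alt (s : String) : Int :=
  let l := s.toList
  let n : Int := l.length
  let res := (PySem.List.enumerate l 0).foldl (fun (st : Int × Int) ic =>
      let pre := if ic.2 = '1' then min (st.1 + 2) (ic.1 + 1) else st.1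
      (pre, min st.2 (pre + n - ic.1 - 1))) (0, n)
  res.2

-- ===== PRECONDITION & SPEC =====
def Spec_minimumTime2 (s : String) (out : Int) : Prop := out = minimumTime2_alt s
instance (s : String) (out : Int) : Decidable (Spec_minimumTime2 s out) := by unfold Spec_minimumTime2; infer_instance

-- ===== CLAIM (what is proved, stated in full; the proofs are below) =====
def Claim_equal_minimumTime2 : Prop := ∀ (s : String), Dom_minimumTime2 s → Spec_minimumTime2 s (minimumTime2 s)

-- ===== LEMMAS AND PROOFS =====

-- prefix DP value: A's dp_pre[i] = min cost of clearing the first i characters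
def preF (l : List Char) : Nat → Int
  | 0 => 0
  | (i+1) => if l.getD i ' ' = '1' then min (preF l i + 2) ((i : Int) + 1) else preF l i

-- suffix DP value on a suffix list (A's dp_post[i] = sufF (l.drop i))
def sufF : List Char → Int
  | [] => 0
  | c :: t => if c = '1' then min (sufF t + 2) ((t.length : Int) + 1) else sufF t

def postF (l : List Char) (i : Nat) : Int := sufF (l.drop i)

-- running minimum of g over indices 0..m (B's answer shape, and A's combined array minimum)
def fmin (g : Nat → Int) (m : Nat) : Int :=
  (List.range' 1 m).foldl (fun a j => min a (g j)) (g 0)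

lemma fmin_succ (g : Nat → Int) (m : Nat) : fmin g (m+1) = min (fmin g m) (g (m+1)) := by
  simp [fmin, List.range'_concat, Nat.add_comm 1 m]

lemma fmin_le (g : Nat → Int) : ∀ m i, i ≤ m → fmin g m ≤ g i := by
  intro m
  induction m with
  | zero => intro i hi; simp_all [fmin]
  | succ m ih =>
    intro i hi
    rw [fmin_succ]
    by_cases h : i ≤ m
    · exact le_trans (min_le_left _ _) (ih i h)
    · have : i = m + 1 := by omega
      subst this; exact min_le_right _ _

lemma fmin_attained (g : Nat → Int) : ∀ m, ∃ i, i ≤ m ∧ fmin g m = g i := by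
  intro m
  induction m with
  | zero => exact ⟨0, le_refl 0, rfl⟩
  | succ m ih =>
    obtain ⟨i, hi, he⟩ := ih
    rw [fmin_succ]
    rcases le_total (fmin g m) (g (m+1)) with h | h
    · exact ⟨i, Nat.le_succ_of_le hi, by rw [min_eq_left h, he]⟩
    · exact ⟨m+1, le_refl _, min_eq_right h⟩

lemma sufF_le (t : List Char) : sufF t ≤ (t.length : Int) := by
  induction t with
  | nil => simp [sufF]
  | cons c t ih =>
    simp only [sufF, List.length_cons]
    split <;> push_cast <;> omega

lemma postF_le (l : List Char) (k : Nat) (hk : k ≤ l.length) : postF l k ≤ (l.length : Int) - k := by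
  have h := sufF_le (l.drop k)
  simp only [postF]
  simp only [List.length_drop] at h
  omega

lemma postF_rec (l : List Char) (k : Nat) (hk : k < l.length) :
    postF l k = if l.getD k ' ' = '1' then min (postF l (k+1) + 2) ((l.length : Int) - k)
                else postF l (k+1) := by
  have hd : l.drop k = l[k] :: l.drop (k+1) := List.drop_eq_getElem_cons hk
  have hc : ((l.drop (k+1)).length : Int) + 1 = (l.length : Int) - k := by
    simp only [List.length_drop]; omega
  rw [postF, hd, List.getD_eq_getElem l ' ' hk]
  simp only [sufF, postF, hc]

lemma preF_step_le (l : List Char) (k : Nat) : preF l (k+1) ≤ preF l k + 2 := by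
  simp only [preF]
  split <;> omega

-- for every i there is a split j ≥ i whose one-pass cost is at most dp_pre[i]+dp_post[i]
lemma exists_split (l : List Char) : ∀ m, m ≤ l.length → ∃ j, l.length - m ≤ j ∧ j ≤ l.length ∧
    preF l j + ((l.length : Int) - j) ≤ preF l (l.length - m) + postF l (l.length - m) := by
  intro m
  induction m with
  | zero =>
    intro _
    refine ⟨l.length, by omega, le_refl _, ?_⟩
    simp [postF, List.drop_length, sufF]
  | succ m ih =>
    intro hm
    obtain ⟨j, hj1, hj2, hj3⟩ := ih (by omega)
    set i := l.length - (m+1) with hidef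
    have hi : i < l.length := by omega
    have hi1 : i + 1 = l.length - m := by omega
    rw [← hi1] at hj1 hj3
    have hrec := postF_rec l i hi
    by_cases hc : l.getD i ' ' = '1'
    · rcases le_total ((l.length : Int) - i) (postF l (i+1) + 2) with h | h
      · refine ⟨i, le_refl _, hi.le, ?_⟩
        rw [hrec, if_pos hc]
        omega
      · refine ⟨j, by omega, hj2, ?_⟩
        rw [hrec, if_pos hc]
        have hstep := preF_step_le l i
        omega
    · refine ⟨j, by omega, hj2, ?_⟩
      rw [hrec, if_neg hc]
      have hpre : preF l (i+1) = preF l i := by simp only [preF, if_neg hc]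
      omega

lemma exists_split' (l : List Char) (i : Nat) (hi : i ≤ l.length) : ∃ j, j ≤ l.length ∧
    preF l j + ((l.length : Int) - j) ≤ preF l i + postF l i := by
  obtain ⟨j, _, hj2, hj3⟩ := exists_split l (l.length - i) (Nat.sub_le _ _)
  rw [Nat.sub_sub_self hi] at hj3
  exact ⟨j, hj2, hj3⟩

-- A's first loop builds the prefix DP table
lemma dp_pre_eq (l : List Char) : ∀ k, k ≤ l.length →
    (List.range' 1 k).foldl (fun dp i =>
      if l.getD (i - 1) ' ' = '1' then
        dp.set i (min (dp.getD (i - 1) 0 + 2) (i : Int))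
      else
        dp.set i (dp.getD (i - 1) 0))
      ((List.replicate (l.length + 2) (2 * (l.length : Int))).set 0 0)
    = (List.range (k+1)).map (preF l) ++ List.replicate (l.length + 1 - k) (2 * (l.length : Int)) := by
  intro k
  induction k with
  | zero =>
    intro _
    simp [List.replicate_succ, preF]
  | succ k ih =>
    intro hk
    rw [List.range'_concat, List.foldl_append, ih (by omega), List.foldl_cons, List.foldl_nil]
    simp only [show (1:Nat) + 1 * k = k + 1 from by omega, Nat.add_sub_cancel]
    have hM : ((List.range (k+1)).map (preF l)).length = k + 1 := by simp
    have hget : (((List.range (k+1)).map (preF l)) ++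
        List.replicate (l.length + 1 - k) (2 * (l.length : Int))).getD k 0 = preF l k := by
      rw [List.getD_append _ _ _ _ (by omega)]
      simp [List.getD_eq_getElem?_getD]
    have hrep : List.replicate (l.length + 1 - k) (2 * (l.length : Int))
        = 2 * (l.length : Int) :: List.replicate (l.length - k) (2 * (l.length : Int)) := by
      rw [show l.length + 1 - k = (l.length - k) + 1 by omega, List.replicate_succ]
    have hRHS : (List.range (k+1+1)).map (preF l) ++ List.replicate (l.length + 1 - (k+1)) (2 * (l.length : Int))
        = ((List.range (k+1)).map (preF l) ++ (preF l (k+1) :: List.replicate (l.length - k) (2 * (l.length : Int)))) := by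
      rw [List.range_succ, List.map_append, show l.length + 1 - (k+1) = l.length - k by omega]
      simp
    rw [hRHS]
    by_cases hc : l.getD k ' ' = '1'
    · rw [if_pos hc, hget, hrep, List.set_append_right _ _ (by omega), hM,
          Nat.sub_self, List.set_cons_zero]
      rw [show ((k + 1 : Nat) : Int) = (k : Int) + 1 from by push_cast; ring,
          show preF l (k+1) = min (preF l k + 2) ((k : Int) + 1) from by rw [preF, if_pos hc]]
    · rw [if_neg hc, hget, hrep, List.set_append_right _ _ (by omega), hM,
          Nat.sub_self, List.set_cons_zero]
      rw [show preF l (k+1) = preF l k from by rw [preF, if_neg hc]]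

-- intermediate state of A's backward while loop, after processing indices down to j
def stateAt (l : List Char) (j : Nat) : List Int :=
  List.replicate j (2 * (l.length : Int)) ++
    ((List.range' j (l.length + 1 - j)).map (postF l) ++ [2 * (l.length : Int)])

lemma post_loop (l : List Char) : ∀ j, j ≤ l.length →
    ((List.range j).reverse).foldl (fun dp i =>
      if l.getD i ' ' = '1' then
        dp.set i (min (dp.getD (i + 1) 0 + 2) ((l.length : Int) - i))
      else
        dp.set i (dp.getD (i + 1) 0)) (stateAt l j) = stateAt l 0 := by
  intro j
  induction j with
  | zero => intro _; simp
  | succ j ih =>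
    intro hj
    have hjlt : j < l.length := by omega
    rw [List.range_succ, List.reverse_append]
    simp only [List.reverse_cons, List.reverse_nil, List.nil_append, List.singleton_append,
      List.foldl_cons]
    have hlen1 : (List.replicate (j+1) (2 * (l.length : Int))).length = j + 1 := by simp
    have hget : (stateAt l (j+1)).getD (j+1) 0 = postF l (j+1) := by
      unfold stateAt
      rw [List.getD_append_right _ _ _ _ (by simp), hlen1, Nat.sub_self,
          List.getD_append _ _ _ _ (by simp; omega)]
      have hr : (List.range' (j+1) (l.length - j))[0]? = some (j+1) := by
        rw [show l.length - j = (l.length - j - 1) + 1 from by omega, List.range'_succ]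
        simp
      simp [List.getD_eq_getElem?_getD, hr]
    have hset : ∀ v : Int, (stateAt l (j+1)).set j v
        = List.replicate j (2 * (l.length : Int)) ++ (v ::
          ((List.range' (j+1) (l.length - j)).map (postF l) ++ [2 * (l.length : Int)])) := by
      intro v
      unfold stateAt
      rw [List.set_append_left _ _ (by simp), List.replicate_succ',
          List.set_append_right _ _ (by simp), List.length_replicate, Nat.sub_self]
      simp [show l.length + 1 - (j+1) = l.length - j by omega, List.append_assoc]
    have hstatej : stateAt l j = List.replicate j (2 * (l.length : Int)) ++ (postF l j ::
          ((List.range' (j+1) (l.length - j)).map (postF l) ++ [2 * (l.length : Int)])) := by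
      unfold stateAt
      rw [show l.length + 1 - j = (l.length - j) + 1 by omega, List.range'_succ]
      simp
    have hstep : (if l.getD j ' ' = '1' then
        (stateAt l (j+1)).set j (min ((stateAt l (j+1)).getD (j+1) 0 + 2) ((l.length : Int) - (j : Nat)))
      else (stateAt l (j+1)).set j ((stateAt l (j+1)).getD (j+1) 0)) = stateAt l j := by
      by_cases hc : l.getD j ' ' = '1'
      · rw [if_pos hc, hget, hset, hstatej, postF_rec l j hjlt, if_pos hc]
      · rw [if_neg hc, hget, hset, hstatej, postF_rec l j hjlt, if_neg hc]
    rw [hstep]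
    exact ih (by omega)

lemma state_init (l : List Char) :
    (List.replicate (l.length + 2) (2 * (l.length : Int))).set l.length 0 = stateAt l l.length := by
  have h2 : List.replicate (l.length + 2) (2 * (l.length : Int))
      = List.replicate l.length (2 * (l.length : Int)) ++ [2 * (l.length : Int), 2 * (l.length : Int)] := by
    rw [List.replicate_add]
    rfl
  rw [h2, List.set_append_right _ _ (by simp), List.length_replicate, Nat.sub_self]
  unfold stateAt
  rw [Nat.add_sub_cancel_left]
  simp [postF, List.drop_length, sufF]

lemma state_final (l : List Char) :
    stateAt l 0 = (List.range (l.length + 1)).map (postF l) ++ [2 * (l.length : Int)] := by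
  unfold stateAt
  simp [List.range_eq_range']

-- A's while loop builds the suffix DP table
lemma dp_post_eq (l : List Char) :
    (List.range l.length).reverse.foldl (fun dp i =>
      if l.getD i ' ' = '1' then
        dp.set i (min (dp.getD (i + 1) 0 + 2) ((l.length : Int) - i))
      else
        dp.set i (dp.getD (i + 1) 0))
      ((List.replicate (l.length + 2) (2 * (l.length : Int))).set l.length 0)
    = (List.range (l.length + 1)).map (postF l) ++ [2 * (l.length : Int)] := by
  rw [state_init, post_loop l l.length (le_refl _), state_final]

-- B's fold computes the running minimum of preF j + n - j
lemma loopB (l : List Char) : ∀ m k (ans : Int), k + m = l.length →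
    ((PySem.List.enumerate (l.drop k) (k : Int)).foldl (fun (st : Int × Int) ic =>
      let pre := if ic.2 = '1' then min (st.1 + 2) (ic.1 + 1) else st.1
      (pre, min st.2 (pre + (l.length : Int) - ic.1 - 1))) (preF l k, ans)).2
    = (List.range' (k+1) m).foldl (fun a j => min a (preF l j + (l.length : Int) - j)) ans := by
  intro m
  induction m with
  | zero =>
    intro k ans hk
    have hnil : l.drop k = [] := List.drop_eq_nil_of_le (by omega)
    simp [hnil]
  | succ m ih =>
    intro k ans hk
    have hklt : k < l.length := by omega
    have hpre : (if l[k] = '1' then min (preF l k + 2) ((k : Int) + 1) else preF l k) = preF l (k+1) := by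
      rw [preF, List.getD_eq_getElem l ' ' hklt]
    rw [List.drop_eq_getElem_cons hklt, PySem.List.enumerate_cons, List.foldl_cons,
        List.range'_succ, List.foldl_cons]
    simp only []
    rw [hpre]
    have hcast : ((k : Int) + 1) = ((k + 1 : Nat) : Int) := by push_cast; ring
    have hcast2 : preF l (k+1) + (l.length : Int) - (k : Int) - 1
        = preF l (k+1) + (l.length : Int) - ((k+1 : Nat) : Int) := by push_cast; ring
    rw [hcast, hcast2, ih (k+1) (min ans (preF l (k+1) + (l.length : Int) - ((k+1 : Nat) : Int))) (by omega)]

lemma altB (s : String) :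
    minimumTime2_alt s = fmin (fun j => preF s.toList j + (s.toList.length : Int) - j) s.toList.length := by
  unfold minimumTime2_alt
  have h := loopB s.toList s.toList.length 0 (s.toList.length : Int) (by omega)
  simp only [List.drop_zero, Nat.cast_zero] at h
  rw [show preF s.toList 0 = 0 from rfl] at h
  simp only []
  rw [h]
  simp [fmin, preF]

lemma mainA (s : String) :
    minimumTime2 s = min (min (fmin (fun i => preF s.toList i + postF s.toList i) s.toList.length)
      (2 * (s.toList.length : Int) + 2 * (s.toList.length : Int))) (s.toList.length : Int) := by
  have hpre := dp_pre_eq s.toList s.toList.length (le_refl _)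
  rw [show s.toList.length + 1 - s.toList.length = 1 from by omega, List.replicate_one] at hpre
  have hpost := dp_post_eq s.toList
  unfold minimumTime2
  simp only []
  rw [hpre, hpost]
  rw [List.zip_append (by simp), List.zip_map', List.map_append, List.map_map]
  rw [List.range_eq_range', List.range'_succ, List.map_cons]
  simp only [Function.comp_apply, Nat.zero_add, List.zip_cons_cons, List.zip_nil_right, List.map_cons, List.map_nil, List.cons_append]
  rw [PySem.List.min?_id_cons, Option.getD_some, List.foldl_append, List.foldl_map]
  simp only [List.foldl_cons, List.foldl_nil]
  rfl

-- ===== VERDICT (by name: the statement is the Claim_ definition above) =====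
theorem minimumTime2_spec : Claim_equal_minimumTime2 := by
  intro s _
  unfold Spec_minimumTime2
  rw [mainA, altB]
  set l := s.toList with hl
  set nn := l.length with hnn
  set gB := fun j => preF l j + (nn : Int) - j with hgB
  set g1 := fun i => preF l i + postF l i with hg1
  have hn0 : (0 : Int) ≤ (nn : Int) := Int.natCast_nonneg nn
  have hBn : fmin gB nn ≤ (nn : Int) := by
    have := fmin_le gB nn 0 (Nat.zero_le nn)
    simpa [hgB, preF] using this
  apply le_antisymm
  · -- A ≤ B : B is attained at some j0; dp value at j0 is below
    obtain ⟨j0, hj0, hat⟩ := fmin_attained gB nn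
    rw [hat]
    have h1 : g1 j0 ≤ gB j0 := by
      have := postF_le l j0 hj0
      simp only [hg1, hgB]
      omega
    have h2 : fmin g1 nn ≤ g1 j0 := fmin_le g1 nn j0 hj0
    calc min (min (fmin g1 nn) (2 * (nn:Int) + 2 * nn)) (nn:Int)
        ≤ fmin g1 nn := le_trans (min_le_left _ _) (min_le_left _ _)
      _ ≤ gB j0 := le_trans h2 h1
  · -- B ≤ A
    apply le_min
    · apply le_min
      · obtain ⟨i1, hi1, hat⟩ := fmin_attained g1 nn
        rw [hat]
        obtain ⟨j, hj, hle⟩ := exists_split' l i1 hi1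
        have hle' : gB j ≤ g1 i1 := by simp only [hgB, hg1]; omega
        exact le_trans (fmin_le gB nn j hj) hle'
      · omega
    · exact hBn
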